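-- pv_equiv track=rewrite | github.com/thaddeusj/Cryptopals_Python | break_XOR.py | transpose_blocks
-- ===== SOURCE A (Python) =====
-- def transpose_blocks(iarray, k):
--
--     transposed_blocks = []
--
--     for block_num in range(0,k):
--         transposed_blocks.append([])
--
--         curr_spot = 0
--
--         while(curr_spot*k + block_num < len(iarray)):
--             transposed_blocks[block_num].append(iarray[curr_spot*k + block_num])
--             curr_spot +=1
--
--     return transposed_blocks
-- ===== SOURCE B (Python) =====
-- def transpose_blocks(iarray, k):
--     blocks = [[] for _ in range(k)]
--     if blocks:
--         for i, x in enumerate(iarray):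
--             blocks[i % k].append(x)
--     return blocks
-- ===== Notes on version B (the rewrite author's own statement) =====
-- stated objective: simpler
-- what changed: Replaces the block-outer / stride-inner nested loops (one strided scan of the array per block) with a single forward pass over enumerate(iarray) that distributes each element into blocks[i % k].
import Mathlib
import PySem

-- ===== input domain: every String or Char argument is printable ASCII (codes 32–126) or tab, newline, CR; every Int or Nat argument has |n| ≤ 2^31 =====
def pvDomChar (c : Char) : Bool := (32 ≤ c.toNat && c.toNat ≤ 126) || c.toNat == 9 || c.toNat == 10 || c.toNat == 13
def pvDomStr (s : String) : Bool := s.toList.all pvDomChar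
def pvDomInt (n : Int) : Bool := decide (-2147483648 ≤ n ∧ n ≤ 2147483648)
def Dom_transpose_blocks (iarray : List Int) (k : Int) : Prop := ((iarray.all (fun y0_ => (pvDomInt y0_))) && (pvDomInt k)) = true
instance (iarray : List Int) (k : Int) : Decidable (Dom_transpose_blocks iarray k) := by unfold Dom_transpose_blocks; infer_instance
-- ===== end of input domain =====

-- B replaces A's block-outer/stride-inner nested loops with one forward pass that
-- distributes each element into blocks[i % k]; same return value, no side effects.

-- ===== PORT A =====
-- the inner while-loop of A: appends iarray[curr_spot*k + block_num] while in range.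
-- the '0 < k' conjunct only makes the recursion total; A only runs this loop with
-- block_num ∈ range(0,k), hence 0 < k, where the conjunct is true and changes nothing.
def pyAWhile (iarray : List Int) (k bn : Int) (spot : Int) (acc : List Int) : List Int :=
  if h : 0 < k ∧ spot * k + bn < (iarray.length : Int) then
    pyAWhile iarray k bn (spot + 1) (acc ++ [(PySem.List.pyGet? iarray (spot * k + bn)).getD 0])
  else acc
termination_by ((iarray.length : Int) - (spot * k + bn)).toNat
decreasing_by
  have hx : (spot + 1) * k + bn = spot * k + bn + k := by ring
  omega

def transpose_blocks (iarray : List Int) (k : Int) : List (List Int) :=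
  (PySem.List.pyRange 0 k 1).foldl
    (fun tb bn => tb ++ [pyAWhile iarray k bn 0 []]) []

-- ===== PORT B =====
-- blocks[j].append(x) at a Nat index (the index i % k is nonnegative in B)
def appendAt : List (List Int) → Nat → Int → List (List Int)
  | [], _, _ => []
  | b :: rest, 0, x => (b ++ [x]) :: rest
  | b :: rest, n + 1, x => b :: appendAt rest n x

def transpose_blocks_alt (iarray : List Int) (k : Int) : List (List Int) :=
  let blocks := (PySem.List.pyRange 0 k 1).map (fun _ => ([] : List Int))
  if blocks.isEmpty then blocks
  else
    (PySem.List.enumerate iarray).foldl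
      (fun bs p => appendAt bs (PySem.Int.mod p.1 k).toNat p.2) blocks

-- ===== PRECONDITION & SPEC =====
def Spec_transpose_blocks (iarray : List Int) (k : Int) (out : List (List Int)) : Prop := out = transpose_blocks_alt iarray k
instance (iarray : List Int) (k : Int) (out : List (List Int)) : Decidable (Spec_transpose_blocks iarray k out) := by unfold Spec_transpose_blocks; infer_instance

-- ===== CLAIM (what is proved, stated in full; the proofs are below) =====
def Claim_equal_transpose_blocks : Prop := ∀ (iarray : List Int) (k : Int), Dom_transpose_blocks iarray k → Spec_transpose_blocks iarray k (transpose_blocks iarray k)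

-- ===== LEMMAS AND PROOFS =====

-- canonical strided selection: elements of l at indices idx, idx+k, idx+2k, …
def pickIdx (l : List Int) (k idx : Int) : List Int :=
  if h : 0 < k ∧ idx < (l.length : Int) then
    (PySem.List.pyGet? l idx).getD 0 :: pickIdx l k (idx + k)
  else []
termination_by ((l.length : Int) - idx).toNat
decreasing_by omega

-- walking selection: element at global position i is kept iff i % k = bn
def pickWalk (l : List Int) (k bn i : Int) : List Int :=
  match l with
  | [] => []
  | x :: rest => (if PySem.Int.mod i k = bn then [x] else []) ++ pickWalk rest k bn (i + 1)

lemma emod_small (a k : Int) (h0 : 0 < k) (h1 : -k ≤ a) (h2 : a < k) :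
    a % k = if a < 0 then a + k else a := by
  split_ifs with hn
  · have h3 : (a + k * 1) % k = a % k := Int.add_mul_emod_self_left a k 1
    have h4 := Int.emod_eq_of_lt (a := a + k * 1) (b := k) (by omega) (by omega)
    omega
  · exact Int.emod_eq_of_lt (by omega) h2

lemma emod_sub_one (a r k : Int) (h0 : 0 < k) (hr : a % k = r) :
    (a - 1) % k = if r = 0 then k - 1 else r - 1 := by
  have hr0 : 0 ≤ r := hr ▸ Int.emod_nonneg a (by omega)
  have hrk : r < k := hr ▸ Int.emod_lt_of_pos a h0
  have h1 : (a - 1) % k = (r - 1 % k) % k := by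
    rw [Int.sub_emod, hr]
  by_cases hk1 : k = 1
  · subst hk1; omega
  · have h1k : (1 : Int) % k = 1 := Int.emod_eq_of_lt (by omega) (by omega)
    rw [h1, h1k, emod_small (r - 1) k h0 (by omega) (by omega)]
    split_ifs <;> omega

lemma pyAWhile_eq (iarray : List Int) (k bn : Int) :
    ∀ spot acc, pyAWhile iarray k bn spot acc = acc ++ pickIdx iarray k (spot * k + bn) := by
  intro spot acc
  fun_induction pyAWhile iarray k bn spot acc with
  | case1 spot acc h ih =>
    rw [pickIdx, dif_pos h]
    have hx : (spot + 1) * k + bn = spot * k + bn + k := by ring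
    rw [ih, hx]
    simp
  | case2 spot acc h =>
    rw [pickIdx, dif_neg h]
    simp

lemma pickIdx_shift (x : Int) (l : List Int) (k : Int) :
    ∀ j : Int, 0 < k → 0 ≤ j → pickIdx (x :: l) k (j + 1) = pickIdx l k j := by
  intro j hk hj
  fun_induction pickIdx l k j with
  | case1 j h ih =>
    rw [pickIdx, dif_pos (by simp; omega)]
    rw [show j + 1 + k = (j + k) + 1 by ring, ih (by omega)]
    congr 1
    rw [PySem.List.pyGet?_of_nonneg _ (by omega : (0:Int) ≤ j + 1),
      PySem.List.pyGet?_of_nonneg _ hj]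
    have hjt : (j + 1).toNat = j.toNat + 1 := by omega
    simp [hjt]
  | case2 j h =>
    rw [pickIdx, dif_neg (by simp; omega)]

lemma pickWalk_eq_pickIdx (k : Int) (hk : 0 < k) (bn : Int) (hbn0 : 0 ≤ bn) (hbnk : bn < k) :
    ∀ (l : List Int) (i : Int), pickWalk l k bn i = pickIdx l k ((bn - i) % k) := by
  intro l
  induction l with
  | nil =>
    intro i
    have hnn := Int.emod_nonneg (bn - i) (show k ≠ 0 by omega)
    rw [pickWalk, pickIdx, dif_neg (by simp; omega)]
  | cons x rest ih =>
    intro i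
    have hmod : PySem.Int.mod i k = i % k := PySem.Int.mod_eq_emod_of_pos hk
    have hr0 : 0 ≤ (bn - i) % k := Int.emod_nonneg _ (by omega)
    have hrk : (bn - i) % k < k := Int.emod_lt_of_pos _ hk
    have hstep : (bn - (i + 1)) % k =
        if (bn - i) % k = 0 then k - 1 else (bn - i) % k - 1 := by
      have := emod_sub_one (bn - i) ((bn - i) % k) k hk rfl
      rw [show bn - (i + 1) = (bn - i) - 1 by ring, this]
    have hiff : (i % k = bn) ↔ ((bn - i) % k = 0) := by
      constructor
      · intro h
        have h2 : (bn - i) % k = (bn % k - i % k) % k := Int.sub_emod ..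
        rw [h2, h, Int.emod_eq_of_lt hbn0 hbnk]
        simp
      · intro h
        have h2 : (bn - i) % k = (bn % k - i % k) % k := Int.sub_emod ..
        rw [Int.emod_eq_of_lt hbn0 hbnk] at h2
        have hi0 : 0 ≤ i % k := Int.emod_nonneg _ (by omega)
        have hik : i % k < k := Int.emod_lt_of_pos _ hk
        rw [h, emod_small (bn - i % k) k hk (by omega) (by omega)] at h2
        split_ifs at h2 <;> omega
    rw [pickWalk, ih (i + 1), hstep, hmod]
    by_cases hz : (bn - i) % k = 0
    · have hR : pickIdx (x :: rest) k 0 = x :: pickIdx rest k (k - 1) := by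
        rw [pickIdx, dif_pos (by refine ⟨hk, ?_⟩; simp)]
        rw [show (0 : Int) + k = (k - 1) + 1 by ring,
          pickIdx_shift x rest k (k - 1) hk (by omega), PySem.List.pyGet?_zero_cons]
        rfl
      rw [if_pos (hiff.mpr hz), if_pos hz, hz, hR]
      rfl
    · have h1 : (1 : Int) ≤ (bn - i) % k := by omega
      have hR : pickIdx (x :: rest) k ((bn - i) % k) = pickIdx rest k ((bn - i) % k - 1) := by
        rw [show (bn - i) % k = ((bn - i) % k - 1) + 1 by ring,
          pickIdx_shift x rest k _ hk (by omega)]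
        norm_num
      rw [if_neg (fun h => hz (hiff.mp h)), if_neg hz, hR]
      rfl

lemma appendAt_length (bs : List (List Int)) : ∀ j x, (appendAt bs j x).length = bs.length := by
  induction bs with
  | nil => intro j x; rfl
  | cons b rest ih =>
    intro j x
    cases j with
    | zero => rfl
    | succ n => simpa [appendAt] using ih n x

lemma appendAt_getElem (bs : List (List Int)) :
    ∀ (j : Nat) (x : Int) (bn : Nat) (h : bn < bs.length),
      (appendAt bs j x)[bn]'(by rw [appendAt_length]; exact h) =
        if bn = j then bs[bn] ++ [x] else bs[bn] := by
  induction bs with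
  | nil => intro j x bn h; simp at h
  | cons b rest ih =>
    intro j x bn h
    cases j with
    | zero =>
      cases bn with
      | zero => simp [appendAt]
      | succ m => simp [appendAt]
    | succ n =>
      cases bn with
      | zero => simp [appendAt]
      | succ m =>
        have := ih n x m (by simpa using h)
        simpa [appendAt] using this

lemma bfold_length (k : Int) :
    ∀ (l : List Int) (i : Int) (B : List (List Int)),
      ((PySem.List.enumerate l i).foldl
        (fun bs p => appendAt bs (PySem.Int.mod p.1 k).toNat p.2) B).length = B.length := by
  intro l
  induction l with
  | nil => intro i B; simp [PySem.List.enumerate_nil]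
  | cons x rest ih =>
    intro i B
    rw [PySem.List.enumerate_cons]
    simp only [List.foldl_cons]
    rw [ih, appendAt_length]

-- the fold invariant for B's single pass
lemma bfold_getElem (k : Int) (hk : 0 < k) :
    ∀ (l : List Int) (i : Int) (B : List (List Int)), 0 ≤ i → B.length = k.toNat →
      ∀ (bn : Nat) (h : bn < B.length),
        ((PySem.List.enumerate l i).foldl
          (fun bs p => appendAt bs (PySem.Int.mod p.1 k).toNat p.2) B)[bn]'(by
            rw [bfold_length]; exact h) =
          B[bn] ++ pickWalk l k (bn : Int) i := by
  intro l
  induction l with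
  | nil =>
    intro i B hi hB bn h
    simp [PySem.List.enumerate_nil, pickWalk]
  | cons x rest ih =>
    intro i B hi hB bn h
    simp only [PySem.List.enumerate_cons, List.foldl_cons]
    have hlen : (appendAt B (PySem.Int.mod i k).toNat x).length = k.toNat := by
      rw [appendAt_length]; exact hB
    rw [ih (i + 1) (appendAt B (PySem.Int.mod i k).toNat x) (by omega) hlen bn
      (by rw [appendAt_length]; exact h)]
    rw [appendAt_getElem B _ x bn h]
    rw [pickWalk]
    have hmod : PySem.Int.mod i k = i % k := PySem.Int.mod_eq_emod_of_pos hk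
    have hi0 : 0 ≤ i % k := Int.emod_nonneg _ (by omega)
    have hik : i % k < k := Int.emod_lt_of_pos _ hk
    by_cases hc : PySem.Int.mod i k = (bn : Int)
    · rw [if_pos hc, if_pos (by rw [hmod] at hc; omega)]
      simp
    · rw [if_neg hc, if_neg (by rw [hmod] at hc ⊢; omega)]
      simp

lemma foldl_append_map (L : List Int) (f : Int → List Int) :
    ∀ acc, L.foldl (fun tb bn => tb ++ [f bn]) acc = acc ++ L.map f := by
  induction L with
  | nil => intro acc; simp
  | cons a l ih => intro acc; simp [ih]

-- ===== VERDICT (by name: the statement is the Claim_ definition above) =====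
theorem transpose_blocks_spec : Claim_equal_transpose_blocks := by
  intro iarray k _
  unfold Spec_transpose_blocks transpose_blocks transpose_blocks_alt
  by_cases hk0 : k ≤ 0
  · rw [PySem.List.pyRange_one_eq_nil hk0]
    simp
  · have hk : 0 < k := by omega
    have hBlen : ((PySem.List.pyRange 0 k 1).map (fun _ => ([] : List Int))).length = k.toNat := by
      simp [PySem.List.length_pyRange_one]
    rw [foldl_append_map]
    simp only [List.nil_append]
    rw [if_neg (by
      rw [List.isEmpty_iff]
      intro hcon
      have := congrArg List.length hcon
      rw [hBlen] at this
      simp at this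
      omega)]
    apply List.ext_getElem
    · rw [bfold_length, hBlen]
      simp [PySem.List.length_pyRange_one]
    · intro bn h1 h2
      have hbnk : bn < k.toNat := by
        simpa [PySem.List.length_pyRange_one] using h1
      rw [bfold_getElem k hk iarray 0 _ le_rfl hBlen bn (by omega)]
      rw [List.getElem_map, List.getElem_map, PySem.List.getElem_pyRange_one]
      simp only [List.nil_append, zero_add]
      rw [pyAWhile_eq, pickWalk_eq_pickIdx k hk (bn : Int) (by omega) (by omega)]
      rw [show ((bn : Int) - 0) = (bn : Int) by ring,
        Int.emod_eq_of_lt (by omega) (by omega)]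
      norm_num
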